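-- pv_equiv track=rewrite | github.com/danpla/dpscreenocr | src/ui/ui_common/cfg_key_values_gen.py | gen_var_name
-- ===== SOURCE A (Python) =====
-- def gen_var_name(key, prefix='', postfix=''):
--     name = prefix
--
--     upcase = prefix != ''
--     for c in key:
--         if c == '_':
--             upcase = True
--         elif upcase:
--             name += c.upper()
--             upcase = False
--         else:
--             name += c
--
--     return name + postfix
-- ===== SOURCE B (Python) =====
-- def gen_var_name(key, prefix='', postfix=''):
--     words = key.split('_')
--     parts = [w if i == 0 and not prefix else w[:1].upper() + w[1:]
--              for i, w in enumerate(words)]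
--     return prefix + ''.join(parts) + postfix
-- ===== Notes on version B (the rewrite author's own statement) =====
-- stated objective: idiomatic
-- what changed: Replaces the character-by-character loop with an upcase flag by splitting the key on underscores, capitalizing the first character of each segment (every segment except the first one when the prefix is empty) and joining.
import Mathlib
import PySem

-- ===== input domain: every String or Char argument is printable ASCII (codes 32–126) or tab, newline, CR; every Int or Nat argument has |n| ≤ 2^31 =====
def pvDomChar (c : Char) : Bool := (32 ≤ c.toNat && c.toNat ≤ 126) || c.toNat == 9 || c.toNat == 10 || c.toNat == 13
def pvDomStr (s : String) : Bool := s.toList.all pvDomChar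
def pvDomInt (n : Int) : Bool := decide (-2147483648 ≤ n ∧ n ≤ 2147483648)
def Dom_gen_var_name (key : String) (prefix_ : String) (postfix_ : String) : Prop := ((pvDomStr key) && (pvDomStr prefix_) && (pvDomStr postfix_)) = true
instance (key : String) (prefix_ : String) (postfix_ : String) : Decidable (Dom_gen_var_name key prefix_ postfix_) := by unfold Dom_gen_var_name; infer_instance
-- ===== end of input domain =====

-- B replaces A's per-character loop with an upcase flag by split('_') + capitalize-each-segment + join (idiomatic decomposition, same cost).

-- ===== PORT A =====
-- loop body of A's `for c in key` (state: name so far, upcase flag)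
def stepA (st : List Char × Bool) (c : Char) : List Char × Bool :=
  if c = '_' then (st.1, true)
  else if st.2 then (st.1 ++ [PySem.Chars.upperChar c], false)
  else (st.1 ++ [c], false)

def genACore (keyC prefC postC : List Char) : List Char :=
  (keyC.foldl stepA (prefC, !prefC.isEmpty)).1 ++ postC

def gen_var_name (key : String) (prefix_ : String) (postfix_ : String) : String :=
  String.mk (genACore key.toList prefix_.toList postfix_.toList)

-- ===== PORT B =====
-- w[:1].upper() + w[1:]
def capSeg (w : List Char) : List Char :=
  PySem.Chars.upper (PySem.Chars.slice w none (some 1)) ++ PySem.Chars.slice w (some 1) none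

def genBCore (keyC prefC postC : List Char) : List Char :=
  let words := PySem.Chars.splitOn keyC ['_']
  let parts := (PySem.List.enumerate words).map
    (fun iw => if iw.1 = 0 ∧ prefC.isEmpty then iw.2 else capSeg iw.2)
  prefC ++ PySem.Chars.join [] parts ++ postC

def gen_var_name_alt (key : String) (prefix_ : String) (postfix_ : String) : String :=
  String.mk (genBCore key.toList prefix_.toList postfix_.toList)

-- ===== PRECONDITION & SPEC =====
def Spec_gen_var_name (key : String) (prefix_ : String) (postfix_ : String) (out : String) : Prop := out = gen_var_name_alt key prefix_ postfix_
instance (key : String) (prefix_ : String) (postfix_ : String) (out : String) : Decidable (Spec_gen_var_name key prefix_ postfix_ out) := by unfold Spec_gen_var_name; infer_instance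

-- ===== CLAIM (what is proved, stated in full; the proofs are below) =====
def Claim_equal_gen_var_name : Prop := ∀ (key : String) (prefix_ : String) (postfix_ : String), Dom_gen_var_name key prefix_ postfix_ → Spec_gen_var_name key prefix_ postfix_ (gen_var_name key prefix_ postfix_)

-- ===== LEMMAS AND PROOFS =====

-- What A's loop appends for the remaining characters, given the current upcase flag.
def outA : List Char → Bool → List Char
  | [], _ => []
  | c :: rest, up =>
      if c = '_' then outA rest true
      else (if up then [PySem.Chars.upperChar c] else [c]) ++ outA rest false

-- Clean recursive characterisation of splitting on '_' (cur = current segment, reversed).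
def splitU : List Char → List Char → List (List Char)
  | [], cur => [cur.reverse]
  | c :: rest, cur =>
      if c = '_' then cur.reverse :: splitU rest [] else splitU rest (c :: cur)

def capW (w : List Char) : List Char := (w.take 1).map PySem.Chars.upperChar ++ w.drop 1
def capIf (up : Bool) (w : List Char) : List Char := if up then capW w else w

-- join of the capitalized segments: first segment capitalized iff `up`, the rest always.
def bjoin : Bool → List (List Char) → List Char
  | _, [] => []
  | up, w :: ws => capIf up w ++ bjoin true ws

theorem go_nil (fuel : Nat) (cur : List Char) (acc : List (List Char)) :
    PySem.Chars.splitOn.go ['_'] fuel [] cur acc = (cur.reverse :: acc).reverse := by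
  cases fuel <;> simp [PySem.Chars.splitOn.go]

theorem go_cons (fuel : Nat) (c : Char) (rest cur : List Char) (acc : List (List Char)) :
    PySem.Chars.splitOn.go ['_'] (fuel + 1) (c :: rest) cur acc =
      if c = '_' then PySem.Chars.splitOn.go ['_'] fuel rest [] (cur.reverse :: acc)
      else PySem.Chars.splitOn.go ['_'] fuel rest (c :: cur) acc := by
  simp only [PySem.Chars.splitOn.go, List.isPrefixOf]
  by_cases h : c = '_'
  · subst h
    have hb : (('_' == '_' && true) = true) := rfl
    rw [if_pos hb, if_pos rfl]
    rfl
  · have hb : ¬ (('_' == c && true) = true) := by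
      rw [Bool.and_true, beq_iff_eq]; exact fun hx => h hx.symm
    rw [if_neg hb, if_neg h]

theorem go_splitU (l : List Char) : ∀ (fuel : Nat) (cur : List Char) (acc : List (List Char)),
    l.length < fuel →
    PySem.Chars.splitOn.go ['_'] fuel l cur acc = acc.reverse ++ splitU l cur := by
  induction l with
  | nil => intro fuel cur acc _; simp [go_nil, splitU]
  | cons c rest ih =>
      intro fuel cur acc h
      obtain ⟨f, rfl⟩ : ∃ f, fuel = f + 1 := ⟨fuel - 1, by omega⟩
      rw [go_cons]
      by_cases hc : c = '_' <;>
        simp [hc, splitU, ih f _ _ (by simpa using Nat.lt_of_succ_lt_succ h)]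

theorem splitOn_eq_splitU (l : List Char) :
    PySem.Chars.splitOn l ['_'] = splitU l [] := by
  simpa using go_splitU l (l.length + 1) [] [] (by omega)

theorem capW_append (w : List Char) (c : Char) (h : w ≠ []) :
    capW (w ++ [c]) = capW w ++ [c] := by
  cases w with
  | nil => exact absurd rfl h
  | cons a t => simp [capW]

theorem capIf_append (up : Bool) (w : List Char) (c : Char) (h : w ≠ []) :
    capIf up (w ++ [c]) = capIf up w ++ [c] := by
  cases up <;> simp [capIf, capW_append w c h]

theorem bjoin_splitU (l : List Char) : ∀ (cur : List Char) (up : Bool),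
    bjoin up (splitU l cur) =
      capIf up cur.reverse ++ outA l (if cur = [] then up else false) := by
  induction l with
  | nil => intro cur up; simp [splitU, bjoin, outA]
  | cons c rest ih =>
      intro cur up
      by_cases hc : c = '_'
      · simp [splitU, hc, bjoin, outA, ih [] true, capIf, capW]
      · cases cur with
        | nil =>
            simp only [splitU, if_neg hc, ih [c] up, List.reverse_cons, List.reverse_nil,
              List.nil_append]
            cases up <;> simp [capIf, capW, outA, hc]
        | cons a t =>
            simp only [splitU, if_neg hc, ih (c :: a :: t) up]
            simp only [List.reverse_cons]
            rw [show t.reverse ++ [a] ++ [c] = (t.reverse ++ [a]) ++ [c] by simp,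
              capIf_append up (t.reverse ++ [a]) c (by simp)]
            simp [outA, hc]

theorem foldA_outA (l : List Char) : ∀ (n : List Char) (up : Bool),
    (l.foldl stepA (n, up)).1 = n ++ outA l up := by
  induction l with
  | nil => intro n up; simp [outA]
  | cons c rest ih =>
      intro n up
      by_cases hc : c = '_'
      · simp [stepA, hc, ih, outA]
      · cases up <;> simp [stepA, hc, ih, outA]

theorem flatten_intersperse_nil (ps : List (List Char)) :
    (List.intersperse ([] : List Char) ps).flatten = ps.flatten := by
  induction ps with
  | nil => rfl
  | cons a t ih =>
      cases t with
      | nil => rfl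
      | cons b u => simpa [List.intersperse] using ih

theorem capSeg_eq_capW (w : List Char) : capSeg w = capW w := by
  simp [capSeg, capW, PySem.Chars.upper, PySem.Chars.slice_eq_listSlice,
    PySem.List.slice_to (b := 1) w (by norm_num),
    PySem.List.slice_from (a := 1) w (by norm_num)]

theorem flatten_map_capSeg (ws : List (List Char)) :
    (ws.map capSeg).flatten = bjoin true ws := by
  induction ws with
  | nil => rfl
  | cons w t ih => simp [bjoin, capIf, capSeg_eq_capW, ih]

theorem enumerate_map_cap (P : Prop) [Decidable P] (ws : List (List Char)) :
    ∀ (s : Int), 1 ≤ s →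
    (PySem.List.enumerate ws s).map
        (fun iw => if iw.1 = 0 ∧ P then iw.2 else capSeg iw.2) = ws.map capSeg := by
  induction ws with
  | nil => intro s _; rfl
  | cons w t ih =>
      intro s hs
      simp only [PySem.List.enumerate, List.map_cons, ih (s + 1) (by omega)]
      have : ¬ (s = 0 ∧ P) := fun h => by omega
      simp [this]

theorem genB_bjoin (keyC prefC postC : List Char) :
    genBCore keyC prefC postC =
      prefC ++ bjoin (!prefC.isEmpty) (splitU keyC []) ++ postC := by
  unfold genBCore
  dsimp only
  rw [splitOn_eq_splitU]
  cases h : splitU keyC [] with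
  | nil => simp [PySem.Chars.join, bjoin, List.intercalate]
  | cons w ws =>
      rw [show PySem.List.enumerate (w :: ws) = (0, w) :: PySem.List.enumerate ws 1 from rfl,
        List.map_cons, enumerate_map_cap (prefC.isEmpty = true) ws 1 (le_refl 1)]
      simp only [PySem.Chars.join, List.intercalate, flatten_intersperse_nil,
        List.flatten_cons, flatten_map_capSeg, bjoin]
      cases hp : prefC.isEmpty
      · simp [capIf, capSeg_eq_capW]
      · simp [capIf]

-- ===== VERDICT (by name: the statement is the Claim_ definition above) =====
theorem gen_var_name_spec : Claim_equal_gen_var_name := by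
  intro key prefix_ postfix_ _
  unfold Spec_gen_var_name gen_var_name gen_var_name_alt
  congr 1
  rw [genB_bjoin, bjoin_splitU]
  unfold genACore
  rw [foldA_outA]
  cases h : prefix_.toList.isEmpty <;> simp [capIf, capW]
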